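-- pv_equiv track=rewrite | github.com/Hwangjiwoo14/python-homework | hw10/longest_rain_period.py | get_max_rain_streak
-- ===== SOURCE A (Python) =====
-- def get_max_rain_streak(years, rainfalls, target_year):
--     max_streak = 0
--     current_streak = 0
--
--     for i in range(len(years)):
--         if years[i] == target_year:
--             if rainfalls[i] > 0:
--                 current_streak += 1
--                 if current_streak > max_streak:
--                     max_streak = current_streak
--             else:
--                 current_streak = 0
--     return max_streak
-- ===== SOURCE B (Python) =====
-- def get_max_rain_streak(years, rainfalls, target_year):
--     # Phase 1: extract the rainfall subsequence for the target year.
--     sub = [rainfalls[i] for i in range(len(years)) if years[i] == target_year]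
--     # Phase 2: collect the lengths of maximal positive runs, then take the max.
--     runs = []
--     cur = 0
--     for r in sub:
--         if r > 0:
--             cur += 1
--         else:
--             if cur:
--                 runs.append(cur)
--             cur = 0
--     if cur:
--         runs.append(cur)
--     return max(runs) if runs else 0
-- ===== Notes on version B (the rewrite author's own statement) =====
-- stated objective: alternative
-- what changed: Splits A's single stateful scan with a running maximum into three separate phases: filter the target-year rainfalls into a subsequence, collect the lengths of its maximal positive runs into a list, and take the max of that list (default 0).
import Mathlib
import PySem

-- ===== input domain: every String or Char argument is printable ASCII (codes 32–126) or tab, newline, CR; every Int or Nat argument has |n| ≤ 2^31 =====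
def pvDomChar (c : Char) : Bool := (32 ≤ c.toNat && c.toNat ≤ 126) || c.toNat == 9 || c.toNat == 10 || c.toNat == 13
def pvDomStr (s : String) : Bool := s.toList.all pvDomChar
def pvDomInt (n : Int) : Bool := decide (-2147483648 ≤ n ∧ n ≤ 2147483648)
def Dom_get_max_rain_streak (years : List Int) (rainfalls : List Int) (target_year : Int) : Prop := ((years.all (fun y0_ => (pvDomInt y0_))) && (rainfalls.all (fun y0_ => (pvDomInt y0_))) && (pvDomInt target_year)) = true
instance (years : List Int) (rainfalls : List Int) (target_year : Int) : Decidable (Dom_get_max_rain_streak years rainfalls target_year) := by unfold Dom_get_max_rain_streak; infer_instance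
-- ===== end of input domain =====

-- B replaces A's single stateful scan with a running maximum by three phases
-- (filter the target-year rainfalls, collect positive-run lengths, max of that list);
-- same cost, alternative decomposition.

-- ===== PORT A =====
-- loop body of A's single for-loop over i in range(len(years))
def stepA (rainfalls : List Int) (target_year : Int) (years : List Int) (st : Int × Int) (i : Nat) : Int × Int :=
  if years.getD i 0 = target_year then
    if rainfalls.getD i 0 > 0 then
      let cur := st.2 + 1
      (if cur > st.1 then cur else st.1, cur)
    else (st.1, 0)
  else st

def get_max_rain_streak (years : List Int) (rainfalls : List Int) (target_year : Int) : Int :=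
  ((List.range years.length).foldl (stepA rainfalls target_year years) (0, 0)).1

-- ===== PORT B =====
-- phase 1: [rainfalls[i] for i in range(len(years)) if years[i] == target_year]
def altSub (years : List Int) (rainfalls : List Int) (target_year : Int) : List Int :=
  ((List.range years.length).filter (fun i => years.getD i 0 = target_year)).map
    (fun i => rainfalls.getD i 0)

-- phase 2 loop body: accumulate (runs, cur)
def stepB (st : List Int × Int) (r : Int) : List Int × Int :=
  if r > 0 then (st.1, st.2 + 1)
  else if st.2 ≠ 0 then (st.1 ++ [st.2], 0) else (st.1, 0)

-- phase 2 result: run lengths, flushing the trailing run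
def altRuns (sub : List Int) : List Int :=
  let st := sub.foldl stepB ([], 0)
  if st.2 ≠ 0 then st.1 ++ [st.2] else st.1

-- phase 3: max(runs) if runs else 0
def get_max_rain_streak_alt (years : List Int) (rainfalls : List Int) (target_year : Int) : Int :=
  match PySem.List.max? (altRuns (altSub years rainfalls target_year)) (fun y => y) with
  | some m => m
  | none => 0

-- ===== PRECONDITION & SPEC =====
-- Pre_ excludes exactly the inputs where Python raises IndexError: some index i with
-- years[i] == target_year but i out of range for rainfalls (both A and B raise there).
def Pre_get_max_rain_streak (years : List Int) (rainfalls : List Int) (target_year : Int) : Prop :=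
  ∀ i : Nat, i < years.length → years.getD i 0 = target_year → i < rainfalls.length
instance (years : List Int) (rainfalls : List Int) (target_year : Int) : Decidable (Pre_get_max_rain_streak years rainfalls target_year) := by unfold Pre_get_max_rain_streak; infer_instance
def pvWitness_get_max_rain_streak : List Int × List Int × Int := ([2020, 2019, 2020, 2020], [1, 5, 2, 0], 2020)

def Spec_get_max_rain_streak (years : List Int) (rainfalls : List Int) (target_year : Int) (out : Int) : Prop := out = get_max_rain_streak_alt years rainfalls target_year
instance (years : List Int) (rainfalls : List Int) (target_year : Int) (out : Int) : Decidable (Spec_get_max_rain_streak years rainfalls target_year out) := by unfold Spec_get_max_rain_streak; infer_instance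

-- ===== CLAIM (what is proved, stated in full; the proofs are below) =====
def Claim_equal_get_max_rain_streak : Prop := ∀ (years : List Int) (rainfalls : List Int) (target_year : Int), Dom_get_max_rain_streak years rainfalls target_year → Pre_get_max_rain_streak years rainfalls target_year → Spec_get_max_rain_streak years rainfalls target_year (get_max_rain_streak years rainfalls target_year)

-- ===== LEMMAS AND PROOFS =====

-- pull a ⊔-ed constant out of a running max
theorem foldl_max_out (l : List Int) : ∀ (a b : Int), l.foldl max (max a b) = max (l.foldl max a) b := by
  induction l with
  | nil => intro a b; rfl
  | cons x t ih =>
    intro a b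
    simp only [List.foldl_cons]
    rw [show max (max a b) x = max (max a x) b by omega]
    exact ih (max a x) b

-- A's fold over the index range equals the matching-value step folded over B's subsequence
theorem foldA_eq_foldSub (years rainfalls : List Int) (target_year : Int) :
    ∀ (l : List Nat) (p : Int × Int),
      l.foldl (stepA rainfalls target_year years) p =
      ((l.filter (fun i => years.getD i 0 = target_year)).map (fun i => rainfalls.getD i 0)).foldl
        (fun (st : Int × Int) r =>
          if r > 0 then
            (if st.2 + 1 > st.1 then st.2 + 1 else st.1, st.2 + 1)
          else (st.1, 0)) p := by
  intro l
  induction l with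
  | nil => intro p; rfl
  | cons i t ih =>
    intro p
    by_cases h : years.getD i 0 = target_year
    · simp only [List.foldl_cons, List.filter_cons, h, decide_true, if_true, List.map_cons, stepA]
      rw [ih]
    · simp only [List.foldl_cons, List.filter_cons, stepA]
      rw [if_neg h, decide_eq_false h]
      simp only [Bool.false_eq_true, if_false]
      rw [ih]

-- finalizing B's state: the max of positive run lengths (seeded with the pending run)
theorem max?_finalize (runs : List Int) (cur : Int) (hcur : 0 ≤ cur)
    (hpos : ∀ x ∈ runs, 0 < x) :
    runs.foldl max (max cur 0) =
      (match PySem.List.max? (if cur ≠ 0 then runs ++ [cur] else runs) (fun y => y) with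
        | some m => m
        | none => 0) := by
  by_cases hc : cur = 0
  · subst hc
    simp only [ne_eq, not_true_eq_false, if_false]
    cases runs with
    | nil => simp [PySem.List.max?]
    | cons x t =>
      rw [PySem.List.max?_id_cons]
      have hx : (0 : Int) < x := hpos x (by simp)
      simp only [List.foldl_cons]
      rw [show max ((0:Int) ⊔ 0) x = max x 0 by omega, foldl_max_out]
      have hle : x ≤ t.foldl max x := (PySem.List.le_foldl_max t x).1
      omega
  · simp only [ne_eq, hc, not_false_eq_true, if_true]
    cases runs with
    | nil =>
      rw [List.nil_append, PySem.List.max?_id_cons]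
      simp only [List.foldl_nil]
      omega
    | cons x t =>
      rw [List.cons_append, PySem.List.max?_id_cons]
      simp only [List.foldl_append, List.foldl_cons, List.foldl_nil]
      rw [show max (max cur 0) x = max x (max cur 0) by omega, foldl_max_out,
        show max cur 0 = cur by omega]

-- loop invariant: A's (max, cur) vs B's (runs, cur)
theorem invar (sub : List Int) :
    ∀ (runs : List Int) (cur m : Int), 0 ≤ cur → (∀ x ∈ runs, 0 < x) →
      m = runs.foldl max (max cur 0) →
      (sub.foldl
        (fun (st : Int × Int) r =>
          if r > 0 then
            (if st.2 + 1 > st.1 then st.2 + 1 else st.1, st.2 + 1)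
          else (st.1, 0)) (m, cur)).1 =
      (match PySem.List.max?
          (let st := sub.foldl stepB (runs, cur)
           if st.2 ≠ 0 then st.1 ++ [st.2] else st.1) (fun y => y) with
        | some m => m
        | none => 0) := by
  induction sub with
  | nil =>
    intro runs cur m hcur hpos hm
    rw [hm]
    exact max?_finalize runs cur hcur hpos
  | cons r rest ih =>
    intro runs cur m hcur hpos hm
    by_cases hr : r > 0
    · simp only [List.foldl_cons, stepB, hr, if_true]
      refine ih runs (cur + 1) _ (by omega) hpos ?_
      rw [show max (cur + 1) 0 = max (max cur 0) (cur + 1) by omega, foldl_max_out, ← hm]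
      split_ifs <;> omega
    · simp only [List.foldl_cons, stepB, hr, if_false]
      by_cases hc : cur ≠ 0
      · simp only [hc, ne_eq, not_false_eq_true, if_true]
        refine ih (runs ++ [cur]) 0 m (le_refl 0) ?_ ?_
        · intro x hx
          rcases List.mem_append.mp hx with h | h
          · exact hpos x h
          · simp at h; omega
        · rw [List.foldl_append]
          simp only [List.foldl_cons, List.foldl_nil]
          rw [show max (0:Int) 0 = max 0 0 by rfl, hm,
            show max cur 0 = max (max 0 0) cur by omega, foldl_max_out]
      · rw [if_neg hc]
        simp only [ne_eq, not_not] at hc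
        subst hc
        exact ih runs 0 m (le_refl 0) hpos hm

-- ===== VERDICT (by name: the statement is the Claim_ definition above) =====
theorem get_max_rain_streak_spec : Claim_equal_get_max_rain_streak := by
  intro years rainfalls target_year _ _
  unfold Spec_get_max_rain_streak get_max_rain_streak get_max_rain_streak_alt altRuns altSub
  rw [foldA_eq_foldSub]
  exact invar _ [] 0 0 (le_refl 0) (by simp) rfl
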